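-- pv_equiv track=rewrite | github.com/MrBrantCode/unitest_baseline | mut_generate/mist_train_cf/cf_47078/solution.py | extract_odd_and_factorial
-- ===== SOURCE A (Python) =====
-- def extract_odd_and_factorial(n):
--     if n <= 0:
--         return []
--     elif n == 1:
--         return [1]
--     else:
--         # Generating array of size "n"
--         array = list(range(1, n+1))
--
--         # constructs a new list containing all odd numbers
--         odd_numbers = [num for num in array if num % 2 != 0]
--
--         # Perform a factorial operation on odd numbers
--         factorial_numbers = [factorial(num) for num in odd_numbers]
--         return factorial_numbers
--
-- def factorial(n):
--     if n == 0:
--         return 1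
--     else:
--         return n * factorial(n-1)
-- ===== SOURCE B (Python) =====
-- def extract_odd_and_factorial(n):
--     res = []
--     fact = 1
--     for k in range(1, n + 1):
--         fact *= k
--         if k % 2:
--             res.append(fact)
--     return res
-- ===== Notes on version B (the rewrite author's own statement) =====
-- stated objective: faster
-- what changed: Single pass with a running factorial product appended at each odd k, instead of building the range, filtering odds, and recomputing each factorial recursively from scratch.
import Mathlib
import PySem

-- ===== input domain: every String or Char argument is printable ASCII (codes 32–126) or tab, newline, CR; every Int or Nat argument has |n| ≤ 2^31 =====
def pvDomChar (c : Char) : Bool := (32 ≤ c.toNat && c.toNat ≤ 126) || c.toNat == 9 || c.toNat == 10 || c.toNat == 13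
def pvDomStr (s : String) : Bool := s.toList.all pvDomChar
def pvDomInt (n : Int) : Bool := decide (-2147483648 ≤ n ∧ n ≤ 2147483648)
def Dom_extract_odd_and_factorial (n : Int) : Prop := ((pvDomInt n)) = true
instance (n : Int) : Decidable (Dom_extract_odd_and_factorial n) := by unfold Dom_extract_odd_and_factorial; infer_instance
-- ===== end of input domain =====

-- B replaces A's filter-then-recompute-each-factorial (O(n^2) multiplications) by one pass
-- with a running factorial product captured at each odd k (O(n)); return values are equal.


-- ===== PORT A =====
-- helper `factorial` of A; Python's base case is n == 0.  The guard is `n ≤ 0` only so that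
-- termination is provable; on every input where the Python recursion terminates (n ≥ 0) the
-- base case is reached exactly at n = 0, so this is exact there.
def pyFactorial (n : Int) : Int :=
  if n ≤ 0 then 1 else n * pyFactorial (n - 1)
termination_by n.toNat
decreasing_by omega

def extract_odd_and_factorial (n : Int) : List Int :=
  if n ≤ 0 then []
  else if n = 1 then [1]
  else
    -- array = list(range(1, n+1)); odd_numbers = [num for num in array if num % 2 != 0]
    -- factorial_numbers = [factorial(num) for num in odd_numbers]
    ((PySem.List.pyRange 1 (n+1) 1).filter
        (fun num => decide (PySem.Int.mod num 2 ≠ 0))).map pyFactorial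

-- ===== PORT B =====
def extract_odd_and_factorial_alt (n : Int) : List Int :=
  ((PySem.List.pyRange 1 (n+1) 1).foldl
      (fun (st : Int × List Int) k =>
        let f := st.1 * k
        if PySem.Int.mod k 2 ≠ 0 then (f, st.2 ++ [f]) else (f, st.2))
      (1, [])).2

-- ===== PRECONDITION & SPEC =====
def Spec_extract_odd_and_factorial (n : Int) (out : List Int) : Prop := out = extract_odd_and_factorial_alt n
instance (n : Int) (out : List Int) : Decidable (Spec_extract_odd_and_factorial n out) := by unfold Spec_extract_odd_and_factorial; infer_instance

-- ===== CLAIM (what is proved, stated in full; the proofs are below) =====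
def Claim_equal_extract_odd_and_factorial : Prop := ∀ (n : Int), Dom_extract_odd_and_factorial n → Spec_extract_odd_and_factorial n (extract_odd_and_factorial n)

-- ===== LEMMAS AND PROOFS =====

lemma loop_inv (m : Nat) :
    (PySem.List.pyRange 1 ((m : Int) + 1) 1).foldl
      (fun (st : Int × List Int) k =>
        let f := st.1 * k
        if PySem.Int.mod k 2 ≠ 0 then (f, st.2 ++ [f]) else (f, st.2))
      (1, [])
    = (pyFactorial m,
       ((PySem.List.pyRange 1 ((m : Int) + 1) 1).filter
          (fun num => decide (PySem.Int.mod num 2 ≠ 0))).map pyFactorial) := by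
  induction m with
  | zero => simp [PySem.List.pyRange_one_eq_nil, pyFactorial]
  | succ m ih =>
    have h1 : (1 : Int) ≤ (m : Int) + 1 := by omega
    have hsplit : PySem.List.pyRange 1 (((m + 1 : Nat) : Int) + 1) 1 = PySem.List.pyRange 1 ((m : Int) + 1) 1 ++ [(m : Int) + 1] := by
      push_cast
      exact PySem.List.pyRange_one_succ_right h1
    have hfact : pyFactorial ((m : Int) + 1) = ((m : Int) + 1) * pyFactorial m := by
      rw [pyFactorial]
      simp [show ¬((m : Int) + 1 ≤ 0) by omega]
    push_cast at hsplit ⊢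
    rw [hsplit, List.foldl_append, ih, List.filter_append, List.map_append]
    simp only [List.foldl_cons, List.foldl_nil, List.filter_cons, List.filter_nil]
    by_cases hodd : ((m : Int) + 1) % 2 = 1 <;>
      simp [hodd, hfact, mul_comm]

-- ===== VERDICT (by name: the statement is the Claim_ definition above) =====
theorem extract_odd_and_factorial_spec : Claim_equal_extract_odd_and_factorial := by
  intro n _
  unfold Spec_extract_odd_and_factorial extract_odd_and_factorial extract_odd_and_factorial_alt
  by_cases h0 : n ≤ 0
  · simp [h0, PySem.List.pyRange_one_eq_nil (show n + 1 ≤ 1 by omega)]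
  · by_cases h1 : n = 1
    · subst h1; decide
    · simp only [if_neg h0, if_neg h1]
      obtain ⟨m, hm⟩ : ∃ m : Nat, n = (m : Int) := ⟨n.toNat, by omega⟩
      subst hm
      rw [loop_inv m]
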